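-- pv_equiv track=rewrite | github.com/tejava7177/New_LSTM | SongMaker/make_midi_test/leadGuide_Test.py | _fit_register
-- ===== SOURCE A (Python) =====
-- def _fit_register(midi: int, low: int, high: int) -> int:
--     if midi is None:
--         midi = 72  # C5 fallback
--     while midi < low:
--         midi += 12
--     while midi > high:
--         midi -= 12
--     return midi
-- ===== SOURCE B (Python) =====
-- def _fit_register(midi: int, low: int, high: int) -> int:
--     if midi is None:
--         midi = 72  # C5 fallback
--     # phase 1: closed-form number of upward octave steps (ceil((low-midi)/12))
--     midi += 12 * max(0, -((midi - low) // 12))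
--     # phase 2: closed-form number of downward octave steps (ceil((midi-high)/12))
--     midi -= 12 * max(0, -((high - midi) // 12))
--     return midi
-- ===== Notes on version B (the rewrite author's own statement) =====
-- stated objective: faster
-- what changed: Replaced the two octave-stepping while-loops by two closed-form ceiling-division formulas applied in the same up-then-down order.
import Mathlib
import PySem

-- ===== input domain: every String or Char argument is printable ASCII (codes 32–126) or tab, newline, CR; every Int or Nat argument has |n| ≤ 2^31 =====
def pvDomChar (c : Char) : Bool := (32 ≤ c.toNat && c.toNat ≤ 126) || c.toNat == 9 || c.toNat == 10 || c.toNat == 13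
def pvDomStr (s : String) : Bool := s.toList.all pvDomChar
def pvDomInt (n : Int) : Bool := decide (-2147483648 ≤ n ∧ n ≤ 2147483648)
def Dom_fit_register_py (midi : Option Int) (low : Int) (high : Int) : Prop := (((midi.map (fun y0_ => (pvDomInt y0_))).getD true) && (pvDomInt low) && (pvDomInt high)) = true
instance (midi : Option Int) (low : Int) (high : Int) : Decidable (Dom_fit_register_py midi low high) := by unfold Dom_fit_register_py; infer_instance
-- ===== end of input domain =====

-- B replaces the two octave-stepping while-loops by closed-form ceiling divisions (O(1) instead of linear in the distance).

-- ===== PORT A =====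
-- 'while midi < low: midi += 12'
def pvUpLoop (midi low : Int) : Int :=
  if midi < low then pvUpLoop (midi + 12) low else midi
termination_by (low - midi).toNat
decreasing_by omega

-- 'while midi > high: midi -= 12'
def pvDownLoop (midi high : Int) : Int :=
  if midi > high then pvDownLoop (midi - 12) high else midi
termination_by (midi - high).toNat
decreasing_by omega

def fit_register_py (midi : Option Int) (low : Int) (high : Int) : Int :=
  let m := match midi with | none => 72 | some v => v
  pvDownLoop (pvUpLoop m low) high

-- ===== PORT B =====
def fit_register_py_alt (midi : Option Int) (low : Int) (high : Int) : Int :=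
  let m0 := match midi with | none => 72 | some v => v
  let m1 := m0 + 12 * max 0 (-(PySem.Int.floordiv (m0 - low) 12))
  m1 - 12 * max 0 (-(PySem.Int.floordiv (high - m1) 12))

-- ===== PRECONDITION & SPEC =====
def Spec_fit_register_py (midi : Option Int) (low : Int) (high : Int) (out : Int) : Prop := out = fit_register_py_alt midi low high
instance (midi : Option Int) (low : Int) (high : Int) (out : Int) : Decidable (Spec_fit_register_py midi low high out) := by unfold Spec_fit_register_py; infer_instance

-- ===== CLAIM (what is proved, stated in full; the proofs are below) =====
def Claim_equal_fit_register_py : Prop := ∀ (midi : Option Int) (low : Int) (high : Int), Dom_fit_register_py midi low high → Spec_fit_register_py midi low high (fit_register_py midi low high)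

-- ===== LEMMAS AND PROOFS =====
theorem pvUpLoop_eq (m low : Int) : pvUpLoop m low = m + 12 * max 0 (-(PySem.Int.floordiv (m - low) 12)) := by
  fun_induction pvUpLoop m low with
  | case1 m h ih =>
    rw [ih]
    rw [PySem.Int.floordiv_eq_ediv_of_pos (a := m + 12 - low) (by omega),
        PySem.Int.floordiv_eq_ediv_of_pos (a := m - low) (by omega)]
    omega
  | case2 m h =>
    rw [PySem.Int.floordiv_eq_ediv_of_pos (by omega)]
    omega

theorem pvDownLoop_eq (m high : Int) : pvDownLoop m high = m - 12 * max 0 (-(PySem.Int.floordiv (high - m) 12)) := by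
  fun_induction pvDownLoop m high with
  | case1 m h ih =>
    rw [ih]
    rw [PySem.Int.floordiv_eq_ediv_of_pos (a := high - (m - 12)) (by omega),
        PySem.Int.floordiv_eq_ediv_of_pos (a := high - m) (by omega)]
    omega
  | case2 m h =>
    rw [PySem.Int.floordiv_eq_ediv_of_pos (by omega)]
    omega

-- ===== VERDICT (by name: the statement is the Claim_ definition above) =====
theorem fit_register_py_spec : Claim_equal_fit_register_py := by
  intro midi low high _
  unfold Spec_fit_register_py fit_register_py fit_register_py_alt
  simp only [pvUpLoop_eq, pvDownLoop_eq]
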